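-- pv_equiv track=rewrite | github.com/md12ol/TripleA | Processing.py | calc_best_naive
-- ===== SOURCE A (Python) =====
-- def calc_best_naive(seq_set, max_len, min_len):
--     val = 0
--     seq_set = seq_set.copy()
--     for idx in range(min_len):
--         if seq_set[0][idx] == seq_set[1][idx] and seq_set[1][idx] == seq_set[2][idx]:
--             val += 3
--             pass
--         elif seq_set[0][idx] == seq_set[1][idx]:
--             val += 2
--             pass
--         elif seq_set[0][idx] == seq_set[2][idx]:
--             val += 2
--             pass
--         elif seq_set[1][idx] == seq_set[2][idx]:
--             val += 2
--             pass
--         else: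
--             val += 1
--             pass
--         pass
--     lens = [len(seq) for seq in seq_set]
--     if lens[0] < lens[1] and lens[0] < lens[2]:
--         seq_set = seq_set[1:]
--         pass
--     elif lens[1] < lens[0] and lens[1] < lens[2]:
--         seq_set = [seq_set[0], seq_set[2]]
--         pass
--     elif lens[2] < lens[0] and lens[2] < lens[1]:
--         seq_set = seq_set[:2]
--         pass
--
--     smaller = min(len(seq_set[0]), len(seq_set[1]))
--     for idx in range(min_len, smaller):
--         if seq_set[0][idx] == seq_set[1][idx]:
--             val += 2
--             pass
--         else:
--             val += 1
--             pass
--         pass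
--     val += max_len - smaller
--     return val
-- ===== SOURCE B (Python) =====
-- def calc_best_naive(seq_set, max_len, min_len):
--     # Closed-form counting: total = range lengths + pairwise match counts
--     # minus triple-match count (inclusion-exclusion for the all-equal cap).
--     a, b, c = seq_set[0], seq_set[1], seq_set[2]
--
--     def matches(s, t, lo, hi):
--         return sum(s[i] == t[i] for i in range(lo, hi))
--
--     def triple_matches(lo, hi):
--         return sum(a[i] == b[i] and b[i] == c[i] for i in range(lo, hi))
--
--     if len(a) < len(b) and len(a) < len(c):
--         p, q = b, c
--     elif len(b) < len(a) and len(b) < len(c):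
--         p, q = a, c
--     else:
--         p, q = a, b
--     smaller = min(len(p), len(q))
--     return (max_len - smaller
--             + max(0, min_len)
--             + matches(a, b, 0, min_len) + matches(a, c, 0, min_len)
--             + matches(b, c, 0, min_len) - triple_matches(0, min_len)
--             + max(0, smaller - min_len)
--             + matches(p, q, min_len, smaller))
-- ===== Notes on version B (the rewrite author's own statement) =====
-- stated objective: alternative
-- what changed: B abandons A's two accumulating score loops (four-way ladder, then if/else) for a closed-form inclusion-exclusion formula: the result equals max_len - smaller plus the range lengths plus independent pairwise match counts minus the triple-match count, each computed by its own counting pass.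
import Mathlib
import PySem

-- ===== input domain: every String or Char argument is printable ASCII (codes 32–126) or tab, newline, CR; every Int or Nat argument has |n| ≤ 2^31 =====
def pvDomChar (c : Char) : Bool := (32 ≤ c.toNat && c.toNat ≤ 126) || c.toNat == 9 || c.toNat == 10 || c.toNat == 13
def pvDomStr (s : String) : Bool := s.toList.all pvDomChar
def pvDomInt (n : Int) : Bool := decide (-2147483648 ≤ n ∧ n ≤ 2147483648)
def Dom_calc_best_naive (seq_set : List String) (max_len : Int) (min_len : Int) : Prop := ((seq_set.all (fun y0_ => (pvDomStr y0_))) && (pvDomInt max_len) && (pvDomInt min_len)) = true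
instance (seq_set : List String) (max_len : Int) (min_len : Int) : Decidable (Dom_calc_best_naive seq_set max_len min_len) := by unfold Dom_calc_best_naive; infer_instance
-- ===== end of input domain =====

-- B replaces A's two accumulating score loops by a closed-form inclusion-exclusion formula:
-- max_len - smaller + range lengths + pairwise match counts - triple match count,
-- each count by its own pass (objective: alternative; return value only).

-- ===== PORT A =====
-- s[i] for chars; Python raises on out-of-range, where Pre_ excludes, so the default is unreachable
def pvCharAt (s : String) (i : Int) : Char := PySem.List.pyGetD s.toList i ' '

def calc_best_naive (seq_set : List String) (max_len : Int) (min_len : Int) : Int :=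
  let s := seq_set    -- seq_set.copy(): the copy is irrelevant for the return value
  let val : Int := (PySem.List.pyRange 0 min_len 1).foldl (fun val idx =>
    let x0 := pvCharAt (PySem.List.pyGetD s 0 "") idx
    let x1 := pvCharAt (PySem.List.pyGetD s 1 "") idx
    let x2 := pvCharAt (PySem.List.pyGetD s 2 "") idx
    if x0 = x1 ∧ x1 = x2 then val + 3
    else if x0 = x1 then val + 2
    else if x0 = x2 then val + 2
    else if x1 = x2 then val + 2
    else val + 1) 0
  let lens : List Int := s.map (fun q => PySem.Str.len q)
  let s2 :=
    if PySem.List.pyGetD lens 0 0 < PySem.List.pyGetD lens 1 0 ∧ PySem.List.pyGetD lens 0 0 < PySem.List.pyGetD lens 2 0 then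
      PySem.List.slice s (some 1) none
    else if PySem.List.pyGetD lens 1 0 < PySem.List.pyGetD lens 0 0 ∧ PySem.List.pyGetD lens 1 0 < PySem.List.pyGetD lens 2 0 then
      [PySem.List.pyGetD s 0 "", PySem.List.pyGetD s 2 ""]
    else if PySem.List.pyGetD lens 2 0 < PySem.List.pyGetD lens 0 0 ∧ PySem.List.pyGetD lens 2 0 < PySem.List.pyGetD lens 1 0 then
      PySem.List.slice s none (some 2)
    else s
  let smaller : Int := min (PySem.Str.len (PySem.List.pyGetD s2 0 "")) (PySem.Str.len (PySem.List.pyGetD s2 1 ""))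
  let val := (PySem.List.pyRange min_len smaller 1).foldl (fun val idx =>
    if pvCharAt (PySem.List.pyGetD s2 0 "") idx = pvCharAt (PySem.List.pyGetD s2 1 "") idx then val + 2
    else val + 1) val
  val + max_len - smaller

-- ===== PORT B =====
-- matches(s, t, lo, hi) = sum(s[i] == t[i] for i in range(lo, hi))
def pvMatches (s t : String) (lo hi : Int) : Int :=
  (PySem.List.pyRange lo hi 1).foldl
    (fun acc i => acc + (if pvCharAt s i = pvCharAt t i then 1 else 0)) 0

-- triple_matches(lo, hi) = sum(a[i] == b[i] and b[i] == c[i] for i in range(lo, hi))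
def pvTripleMatches (a b c : String) (lo hi : Int) : Int :=
  (PySem.List.pyRange lo hi 1).foldl
    (fun acc i => acc + (if pvCharAt a i = pvCharAt b i ∧ pvCharAt b i = pvCharAt c i then 1 else 0)) 0

def calc_best_naive_alt (seq_set : List String) (max_len : Int) (min_len : Int) : Int :=
  let a := PySem.List.pyGetD seq_set 0 ""
  let b := PySem.List.pyGetD seq_set 1 ""
  let c := PySem.List.pyGetD seq_set 2 ""
  let pq :=
    if PySem.Str.len a < PySem.Str.len b ∧ PySem.Str.len a < PySem.Str.len c then (b, c)
    else if PySem.Str.len b < PySem.Str.len a ∧ PySem.Str.len b < PySem.Str.len c then (a, c)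
    else (a, b)
  let smaller : Int := min (PySem.Str.len pq.1) (PySem.Str.len pq.2)
  max_len - smaller
    + max 0 min_len
    + pvMatches a b 0 min_len + pvMatches a c 0 min_len
    + pvMatches b c 0 min_len - pvTripleMatches a b c 0 min_len
    + max 0 (smaller - min_len)
    + pvMatches pq.1 pq.2 min_len smaller

-- ===== PRECONDITION & SPEC =====
-- Exactly the inputs on which Python A returns normally: at least three sequences, and min_len
-- either between 0 and the least of the first three lengths, or negative but within the negative
-- indexing range -median(lengths) of the surviving pair; everywhere else A raises IndexError.
def Pre_calc_best_naive (seq_set : List String) (max_len : Int) (min_len : Int) : Prop :=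
  3 ≤ seq_set.length ∧
  ((0 ≤ min_len ∧
      min_len ≤ min ((seq_set.getD 0 "").toList.length : Int)
        (min ((seq_set.getD 1 "").toList.length : Int) ((seq_set.getD 2 "").toList.length : Int))) ∨
    (min_len < 0 ∧
      -(max (min ((seq_set.getD 0 "").toList.length : Int) ((seq_set.getD 1 "").toList.length : Int))
          (min (max ((seq_set.getD 0 "").toList.length : Int) ((seq_set.getD 1 "").toList.length : Int))
            ((seq_set.getD 2 "").toList.length : Int))) ≤ min_len))
instance (seq_set : List String) (max_len : Int) (min_len : Int) : Decidable (Pre_calc_best_naive seq_set max_len min_len) := by unfold Pre_calc_best_naive; infer_instance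

def pvWitness_calc_best_naive : List String × Int × Int := (["abc", "abd", "xbc"], 4, 3)

def Spec_calc_best_naive (seq_set : List String) (max_len : Int) (min_len : Int) (out : Int) : Prop := out = calc_best_naive_alt seq_set max_len min_len
instance (seq_set : List String) (max_len : Int) (min_len : Int) (out : Int) : Decidable (Spec_calc_best_naive seq_set max_len min_len out) := by unfold Spec_calc_best_naive; infer_instance

-- ===== CLAIM (what is proved, stated in full; the proofs are below) =====
def Claim_equal_calc_best_naive : Prop := ∀ (seq_set : List String) (max_len : Int) (min_len : Int), Dom_calc_best_naive seq_set max_len min_len → Pre_calc_best_naive seq_set max_len min_len → Spec_calc_best_naive seq_set max_len min_len (calc_best_naive seq_set max_len min_len)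

-- ===== LEMMAS AND PROOFS =====

-- A's first-loop ladder, per position: 1 + the three pair indicators - the triple indicator
theorem pvScore3 (x y z : Char) (val : Int) :
    (if x = y ∧ y = z then val + 3 else if x = y then val + 2 else if x = z then val + 2
      else if y = z then val + 2 else val + 1)
      = val + (1 + (if x = y then (1 : Int) else 0) + (if x = z then (1 : Int) else 0)
          + (if y = z then (1 : Int) else 0)
          - (if x = y ∧ y = z then (1 : Int) else 0)) := by
  by_cases hxy : x = y <;> by_cases hyz : y = z <;> by_cases hxz : x = z <;>
    simp_all

-- sum of my first-loop combination splits into length and the four indicator sums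
theorem pvSumSplit (f1 f2 f3 f4 : Int → Int) (l : List Int) :
    (l.map (fun i => 1 + f1 i + f2 i + f3 i - f4 i)).sum
      = (l.length : Int) + (l.map f1).sum + (l.map f2).sum + (l.map f3).sum - (l.map f4).sum := by
  induction l with
  | nil => simp
  | cons x t ih => simp [ih]; ring

-- sum of my second-loop combination splits into length and the indicator sum
theorem pvSumOneAdd (f : Int → Int) (l : List Int) :
    (l.map (fun i => 1 + f i)).sum = (l.length : Int) + (l.map f).sum := by
  induction l with
  | nil => simp
  | cons x t ih => simp [ih]; ring

-- the counting helpers as sums of indicators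
theorem pvMatches_eq (s t : String) (lo hi : Int) :
    pvMatches s t lo hi
      = ((PySem.List.pyRange lo hi 1).map
          (fun i => if pvCharAt s i = pvCharAt t i then (1 : Int) else 0)).sum := by
  unfold pvMatches
  rw [PySem.List.foldl_add]
  ring

theorem pvTripleMatches_eq (a b c : String) (lo hi : Int) :
    pvTripleMatches a b c lo hi
      = ((PySem.List.pyRange lo hi 1).map
          (fun i => if pvCharAt a i = pvCharAt b i ∧ pvCharAt b i = pvCharAt c i then (1 : Int) else 0)).sum := by
  unfold pvTripleMatches
  rw [PySem.List.foldl_add]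
  ring

-- length of range(lo, hi) as an Int
theorem pvLenRange (lo hi : Int) :
    (((PySem.List.pyRange lo hi 1).length : Int)) = max 0 (hi - lo) := by
  rw [PySem.List.length_pyRange_one]; omega

-- A's first loop equals B's closed form for the first segment
theorem pvLoop1Eq (a b c : String) (n : Int) :
    (PySem.List.pyRange 0 n 1).foldl (fun val idx =>
      if pvCharAt a idx = pvCharAt b idx ∧ pvCharAt b idx = pvCharAt c idx then val + 3
      else if pvCharAt a idx = pvCharAt b idx then val + 2
      else if pvCharAt a idx = pvCharAt c idx then val + 2
      else if pvCharAt b idx = pvCharAt c idx then val + 2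
      else val + 1) 0
    = max 0 n + pvMatches a b 0 n + pvMatches a c 0 n + pvMatches b c 0 n
        - pvTripleMatches a b c 0 n := by
  have hb : (fun (val : Int) (idx : Int) =>
      if pvCharAt a idx = pvCharAt b idx ∧ pvCharAt b idx = pvCharAt c idx then val + 3
      else if pvCharAt a idx = pvCharAt b idx then val + 2
      else if pvCharAt a idx = pvCharAt c idx then val + 2
      else if pvCharAt b idx = pvCharAt c idx then val + 2
      else val + 1)
      = fun val idx => val + (1 + (if pvCharAt a idx = pvCharAt b idx then (1 : Int) else 0)
          + (if pvCharAt a idx = pvCharAt c idx then (1 : Int) else 0)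
          + (if pvCharAt b idx = pvCharAt c idx then (1 : Int) else 0)
          - (if pvCharAt a idx = pvCharAt b idx ∧ pvCharAt b idx = pvCharAt c idx then (1 : Int) else 0)) := by
    funext val idx; exact pvScore3 _ _ _ _
  rw [hb, PySem.List.foldl_add, pvSumSplit, pvMatches_eq, pvMatches_eq, pvMatches_eq,
    pvTripleMatches_eq, pvLenRange]
  ring

-- A's second loop equals B's closed form for the second segment
theorem pvLoop2Eq (p q : String) (lo hi : Int) (init : Int) :
    (PySem.List.pyRange lo hi 1).foldl (fun val idx =>
        if pvCharAt p idx = pvCharAt q idx then val + 2 else val + 1) init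
      = init + max 0 (hi - lo) + pvMatches p q lo hi := by
  have hb : (fun (val : Int) (idx : Int) =>
      if pvCharAt p idx = pvCharAt q idx then val + 2 else val + 1)
      = fun val idx => val + (1 + (if pvCharAt p idx = pvCharAt q idx then (1 : Int) else 0)) := by
    funext val idx; split_ifs <;> ring
  rw [hb, PySem.List.foldl_add, pvSumOneAdd, pvMatches_eq, pvLenRange]
  ring

-- the head / second element of A's trimmed list, for an arbitrary list
theorem pvGet0_tail (s : List String) :
    PySem.List.pyGetD (PySem.List.slice s (some 1) none) 0 "" = PySem.List.pyGetD s 1 "" := by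
  rw [PySem.List.slice_from_one]
  cases s <;> simp [pysem]

theorem pvGet1_tail (s : List String) :
    PySem.List.pyGetD (PySem.List.slice s (some 1) none) 1 "" = PySem.List.pyGetD s 2 "" := by
  rw [PySem.List.slice_from_one]
  cases s <;> simp [pysem]

theorem pvGet0_take2 (s : List String) :
    PySem.List.pyGetD (PySem.List.slice s none (some 2)) 0 "" = PySem.List.pyGetD s 0 "" := by
  have hsl : PySem.List.slice s none (some 2) = s.take 2 := by simp [pysem]
  rw [hsl]
  cases s <;> simp [pysem]

theorem pvGet1_take2 (s : List String) :
    PySem.List.pyGetD (PySem.List.slice s none (some 2)) 1 "" = PySem.List.pyGetD s 1 "" := by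
  have hsl : PySem.List.slice s none (some 2) = s.take 2 := by simp [pysem]
  rw [hsl]
  cases s with
  | nil => rfl
  | cons x t => cases t <;> simp [pysem]

theorem pvGet0_pair (x y : String) : PySem.List.pyGetD [x, y] 0 "" = x := by simp [pysem]

theorem pvGet1_pair (x y : String) : PySem.List.pyGetD [x, y] 1 "" = y := by simp [pysem]

-- lens[i] of A equals len(seq_set[i] or "") of B, for an arbitrary list
theorem pvLens (s : List String) (i : Int) :
    PySem.List.pyGetD (s.map (fun q => PySem.Str.len q)) i 0
      = PySem.Str.len (PySem.List.pyGetD s i "") := by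
  have h : (0 : Int) = PySem.Str.len "" := by simp [pysem]
  rw [h, PySem.List.pyGetD_map]

-- ===== VERDICT (by name: the statement is the Claim_ definition above) =====
theorem calc_best_naive_spec : Claim_equal_calc_best_naive := by
  intro seq_set max_len min_len _ _
  unfold Spec_calc_best_naive calc_best_naive calc_best_naive_alt
  simp only [pvLens, pvLoop1Eq, pvLoop2Eq]
  split_ifs with h1 h2 h3 <;>
    simp only [pvGet0_tail, pvGet1_tail, pvGet0_take2, pvGet1_take2, pvGet0_pair, pvGet1_pair] <;>
    ring
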